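-- pv_equiv track=rewrite | github.com/epfl-ada/ada-2024-project-hotada | src/data/script.py | targets_with_multiple_sources
-- ===== SOURCE A (Python) =====
-- def targets_with_multiple_sources(targets_with_source,targets_for_sources) :
--     "Returns True if there are targets that have multiple sources, False otherwise"
--     for target in targets_with_source :
--         num_sources = 0
--         for targets in targets_for_sources.values() :
--             if target in targets :
--                 num_sources += 1
--         if num_sources>1 :
--             return True
--     return False
-- ===== SOURCE B (Python) =====
-- def targets_with_multiple_sources(targets_with_source, targets_for_sources):
--     "Returns True if there are targets that have multiple sources, False otherwise"
--     counts = {}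
--     for sources in targets_for_sources.values():
--         for t in set(sources):
--             counts[t] = counts.get(t, 0) + 1
--     return any(counts.get(t, 0) > 1 for t in targets_with_source)
-- ===== Notes on version B (the rewrite author's own statement) =====
-- stated objective: faster
-- what changed: Instead of rescanning every source list for every target, B makes one pass over the source lists building a per-target count dict (counting each list once via set()), then answers each target with an O(1) lookup.
import Mathlib
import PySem

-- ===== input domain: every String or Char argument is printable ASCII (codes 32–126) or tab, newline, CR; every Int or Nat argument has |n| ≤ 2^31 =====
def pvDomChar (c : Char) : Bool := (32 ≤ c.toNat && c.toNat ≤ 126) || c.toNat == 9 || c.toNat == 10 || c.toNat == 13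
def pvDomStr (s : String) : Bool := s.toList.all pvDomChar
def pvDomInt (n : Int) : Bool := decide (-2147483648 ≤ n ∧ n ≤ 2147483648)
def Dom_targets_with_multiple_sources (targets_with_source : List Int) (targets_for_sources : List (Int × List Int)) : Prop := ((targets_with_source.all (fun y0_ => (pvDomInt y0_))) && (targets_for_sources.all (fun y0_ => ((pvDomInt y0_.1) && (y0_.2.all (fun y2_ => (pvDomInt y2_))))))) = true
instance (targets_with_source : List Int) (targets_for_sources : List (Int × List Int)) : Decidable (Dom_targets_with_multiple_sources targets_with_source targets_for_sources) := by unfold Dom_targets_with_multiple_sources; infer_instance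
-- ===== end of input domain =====

-- B replaces A's per-target rescan of every source list with one pass building a per-target count dict, then O(1) lookups (faster, asymptotic).


-- ===== PORT A =====
-- for target in …: count containing source lists; early-return True when a count exceeds 1  ⇒ List.any
def targets_with_multiple_sources (targets_with_source : List Int) (targets_for_sources : List (Int × List Int)) : Bool :=
  targets_with_source.any (fun target =>
    decide (1 < (targets_for_sources.map Prod.snd).foldl
      (fun num_sources targets => if targets.contains target then num_sources + 1 else num_sources) (0 : Int)))

-- ===== PORT B =====
def targets_with_multiple_sources_alt (targets_with_source : List Int) (targets_for_sources : List (Int × List Int)) : Bool :=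
  let counts : PySem.Dict Int Int :=
    (targets_for_sources.map Prod.snd).foldl
      (fun d sources => (PySem.Set.ofList sources).foldl (fun d t => d.modify t 0 (· + 1)) d)
      PySem.Dict.empty
  targets_with_source.any (fun t => decide (1 < counts.getD t 0))

-- ===== PRECONDITION & SPEC =====
def Spec_targets_with_multiple_sources (targets_with_source : List Int) (targets_for_sources : List (Int × List Int)) (out : Bool) : Prop := out = targets_with_multiple_sources_alt targets_with_source targets_for_sources
instance (targets_with_source : List Int) (targets_for_sources : List (Int × List Int)) (out : Bool) : Decidable (Spec_targets_with_multiple_sources targets_with_source targets_for_sources out) := by unfold Spec_targets_with_multiple_sources; infer_instance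

-- ===== CLAIM (what is proved, stated in full; the proofs are below) =====
def Claim_equal_targets_with_multiple_sources : Prop := ∀ (targets_with_source : List Int) (targets_for_sources : List (Int × List Int)), Dom_targets_with_multiple_sources targets_with_source targets_for_sources → Spec_targets_with_multiple_sources targets_with_source targets_for_sources (targets_with_multiple_sources targets_with_source targets_for_sources)

-- ===== LEMMAS AND PROOFS =====

-- A's inner counting loop is n0 plus the number of source lists containing t.
theorem twms_countA_eq (L : List (List Int)) (t : Int) (n0 : Int) :
    L.foldl (fun n srcs => if srcs.contains t then n + 1 else n) n0
      = n0 + (L.countP (fun s => s.contains t) : Int) := by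
  induction L generalizing n0 with
  | nil => simp
  | cons s L ih =>
    simp only [List.foldl_cons, List.countP_cons, ih]
    by_cases h : t ∈ s <;> simp [h] <;> push_cast <;> ring

theorem twms_set_count (srcs : List Int) (t : Int) :
    (PySem.Set.ofList srcs).count t = (if srcs.contains t then 1 else 0) := by
  by_cases h : t ∈ srcs
  · rw [List.count_eq_one_of_mem (PySem.Set.nodup_ofList srcs) ((PySem.Set.mem_ofList _ _).2 h)]
    simp [h]
  · rw [List.count_eq_zero_of_not_mem (fun hm => h ((PySem.Set.mem_ofList _ _).1 hm))]
    simp [h]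

-- B's dict after the pass counts, for each t, the source lists containing t.
theorem twms_countB_eq (L : List (List Int)) (d : PySem.Dict Int Int) (t : Int) :
    (L.foldl (fun d srcs => (PySem.Set.ofList srcs).foldl (fun d x => d.modify x 0 (· + 1)) d) d).getD t 0
      = d.getD t 0 + (L.countP (fun s => s.contains t) : Int) := by
  induction L generalizing d with
  | nil => simp
  | cons s L ih =>
    simp only [List.foldl_cons, ih, PySem.Dict.getD_foldl_modify_add_one, twms_set_count,
      List.countP_cons]
    by_cases h : t ∈ s <;> simp [h] <;> push_cast <;> ring

-- ===== VERDICT (by name: the statement is the Claim_ definition above) =====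
theorem targets_with_multiple_sources_spec : Claim_equal_targets_with_multiple_sources := by
  intro tws tfs _
  unfold Spec_targets_with_multiple_sources targets_with_multiple_sources targets_with_multiple_sources_alt
  simp only [twms_countA_eq, twms_countB_eq, PySem.Dict.getD_empty, zero_add]
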